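-- pv_equiv track=rewrite | github.com/Yogee-s/EE4705_nlp_chatbot | data/augment_data.py | question_reformulation
-- ===== SOURCE A (Python) =====
-- def question_reformulation(question):
--     """Reformulate questions using different structures"""
--     question = question.strip()
--
--     # Remove question mark for processing
--     has_question_mark = question.endswith('?')
--     if has_question_mark:
--         question = question[:-1]
--
--     question_lower = question.lower()
--
--     # Pattern-based reformulations
--     reformulations = []
--
--     # "What is X" -> "Can you tell me about X", "Explain X"
--     if question_lower.startswith('what is ') or question_lower.startswith('what are '):
--         topic = question[8:] if question_lower.startswith('what is ') else question[9:]
--         reformulations.extend([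
--             f"Can you tell me about {topic}",
--             f"Explain {topic}",
--             f"Tell me about {topic}",
--             f"I'd like to know about {topic}"
--         ])
--
--     # "How do I" -> "What's the way to", "How can I"
--     elif question_lower.startswith('how do i '):
--         action = question[9:]
--         reformulations.extend([
--             f"What's the way to {action}",
--             f"How can I {action}",
--             f"What are the steps to {action}"
--         ])
--
--     # "Where can I" -> "What's the location of", "How do I find"
--     elif question_lower.startswith('where can i '):
--         action = question[12:]
--         reformulations.extend([
--             f"How do I find where to {action}",
--             f"What's the location to {action}"
--         ])
--
--     # "Do I need" -> "Is it necessary to", "Must I"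
--     elif question_lower.startswith('do i need '):
--         requirement = question[10:]
--         reformulations.extend([
--             f"Is it necessary to have {requirement}",
--             f"Must I have {requirement}",
--             f"Is {requirement} required"
--         ])
--
--     # Add question mark back
--     reformulations = [q + '?' if not q.endswith('?') else q for q in reformulations]
--
--     return reformulations if reformulations else [question + ('?' if has_question_mark else '')]
-- ===== SOURCE B (Python) =====
-- # Reformulation rules: each maps a question opener to output builders.
-- # Instead of lowercasing the whole question, testing startswith and slicing by a
-- # hard-coded offset, B strips each opener case-insensitively character by
-- # character, which yields the topic remainder directly.
--
-- def _after(q, opener):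
--     """Case-insensitively strip `opener` from the front of q.
--     Returns the remainder (the topic) or None if q does not start with it."""
--     if not opener:
--         return q
--     if q and q[0].lower() == opener[0]:
--         return _after(q[1:], opener[1:])
--     return None
--
--
-- _WHAT = ["Can you tell me about ", "Explain ", "Tell me about ", "I'd like to know about "]
--
-- _RULES = [
--     ("what is ", _WHAT),
--     ("what are ", _WHAT),
--     ("how do i ", ["What's the way to ", "How can I ", "What are the steps to "]),
--     ("where can i ", ["How do I find where to ", "What's the location to "]),
--     ("do i need ", ["Is it necessary to have ", "Must I have ", "Is "]),
-- ]
--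
-- # the one template whose text continues after the topic
-- _SUFFIX = {"Is ": " required"}
--
--
-- def question_reformulation(question):
--     """Reformulate questions using different structures (CI prefix-stripping)."""
--     q = question.strip()
--     had_qm = q.endswith('?')
--     if had_qm:
--         q = q[:-1]
--     for opener, heads in _RULES:
--         topic = _after(q, opener)
--         if topic is not None:
--             outs = [h + topic + _SUFFIX.get(h, "") for h in heads]
--             return [o if o.endswith('?') else o + '?' for o in outs]
--     return [q + '?' if had_qm else q]
-- ===== Notes on version B (the rewrite author's own statement) =====
-- stated objective: alternative
-- what changed: Instead of lowercasing the whole question, testing startswith and slicing the topic by a hard-coded per-branch offset, B strips each rule's opener case-insensitively character by character with a recursive helper that yields the topic remainder directly, scanning a rule list with early return; the one non-trivial template suffix lives in a lookup table.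
import Mathlib
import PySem

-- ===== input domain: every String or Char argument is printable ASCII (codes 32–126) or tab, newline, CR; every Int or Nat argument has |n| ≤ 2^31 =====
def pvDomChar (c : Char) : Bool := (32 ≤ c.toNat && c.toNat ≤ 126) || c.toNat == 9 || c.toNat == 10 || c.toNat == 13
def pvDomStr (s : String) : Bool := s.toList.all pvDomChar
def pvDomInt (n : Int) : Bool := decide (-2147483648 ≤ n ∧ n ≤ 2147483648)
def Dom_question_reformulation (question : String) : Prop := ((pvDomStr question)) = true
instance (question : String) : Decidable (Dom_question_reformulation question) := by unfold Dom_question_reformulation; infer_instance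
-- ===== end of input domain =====

-- B replaces A's lower-the-whole-string + startswith + hard-coded slice-offset branch chain
-- by a recursive case-insensitive prefix stripper that yields the topic remainder directly,
-- driven by a rule list scanned with early return: alternative decomposition, same cost.


-- ===== PORT A =====
def question_reformulation (question : String) : List String :=
  let question := PySem.Str.strip question
  let has_question_mark := PySem.Str.endswith question "?"
  let question := if has_question_mark then PySem.Str.slice question none (some (-1)) else question
  let question_lower := PySem.Str.lower question
  let reformulations : List String := []
  let reformulations :=
    if PySem.Str.startswith question_lower "what is " || PySem.Str.startswith question_lower "what are " then
      let topic := if PySem.Str.startswith question_lower "what is "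
        then PySem.Str.slice question (some 8) none
        else PySem.Str.slice question (some 9) none
      reformulations ++ ["Can you tell me about " ++ topic, "Explain " ++ topic,
        "Tell me about " ++ topic, "I'd like to know about " ++ topic]
    else if PySem.Str.startswith question_lower "how do i " then
      let action := PySem.Str.slice question (some 9) none
      reformulations ++ ["What's the way to " ++ action, "How can I " ++ action,
        "What are the steps to " ++ action]
    else if PySem.Str.startswith question_lower "where can i " then
      let action := PySem.Str.slice question (some 12) none
      reformulations ++ ["How do I find where to " ++ action, "What's the location to " ++ action]
    else if PySem.Str.startswith question_lower "do i need " then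
      let requirement := PySem.Str.slice question (some 10) none
      reformulations ++ ["Is it necessary to have " ++ requirement, "Must I have " ++ requirement,
        "Is " ++ requirement ++ " required"]
    else reformulations
  let reformulations := reformulations.map (fun q => if !PySem.Str.endswith q "?" then q ++ "?" else q)
  if reformulations.isEmpty then [question ++ (if has_question_mark then "?" else "")]
  else reformulations

-- ===== PORT B =====
-- _after(q, opener): case-insensitively strip `opener` from the front of q,
-- character by character; returns the remainder (the topic) or none.
def bAfter : List Char → List Char → Option (List Char)
  | q, [] => some q
  | [], _ :: _ => none
  | c :: q, o :: os => if PySem.Chars.lowerChar c == o then bAfter q os else none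

def bWhat : List String :=
  ["Can you tell me about ", "Explain ", "Tell me about ", "I'd like to know about "]

def bRules : List (String × List String) :=
  [("what is ", bWhat), ("what are ", bWhat),
   ("how do i ", ["What's the way to ", "How can I ", "What are the steps to "]),
   ("where can i ", ["How do I find where to ", "What's the location to "]),
   ("do i need ", ["Is it necessary to have ", "Must I have ", "Is "])]

-- the one template whose text continues after the topic (_SUFFIX dict)
def bSuffix : PySem.Dict String String := PySem.Dict.ofList [("Is ", " required")]

-- the 'for opener, heads in _RULES' loop with early return
def bScan (q : List Char) : List (String × List String) → Option (List String)
  | [] => none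
  | (opener, heads) :: rest =>
    match bAfter q opener.toList with
    | some topic =>
        some ((heads.map (fun h => h ++ String.ofList topic ++ bSuffix.getD h "")).map
          (fun o => if PySem.Str.endswith o "?" then o else o ++ "?"))
    | none => bScan q rest

def question_reformulation_alt (question : String) : List String :=
  let q := PySem.Str.strip question
  let hadQm := PySem.Str.endswith q "?"
  let q := if hadQm then PySem.Str.slice q none (some (-1)) else q
  match bScan q.toList bRules with
  | some outs => outs
  | none => [if hadQm then q ++ "?" else q]

-- ===== PRECONDITION & SPEC =====
def Spec_question_reformulation (question : String) (out : List String) : Prop := out = question_reformulation_alt question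
instance (question : String) (out : List String) : Decidable (Spec_question_reformulation question out) := by unfold Spec_question_reformulation; infer_instance

-- ===== CLAIM =====
def Claim_equal_question_reformulation : Prop := ∀ (question : String), Dom_question_reformulation question → Spec_question_reformulation question (question_reformulation question)

-- ===== LEMMAS AND PROOFS =====
-- B's character-level CI stripper = A's lower + startswith + drop-by-length
theorem bAfter_eq (opener : List Char) (q : List Char) :
    bAfter q opener =
      if PySem.Chars.startswith (PySem.Chars.lower q) opener
      then some (q.drop opener.length) else none := by
  induction opener generalizing q with
  | nil => simp [bAfter, PySem.Chars.startswith_iff]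
  | cons o os ih =>
    cases q with
    | nil => simp [bAfter, PySem.Chars.startswith_iff, PySem.Chars.lower]
    | cons c cs =>
      simp only [bAfter, PySem.Chars.lower, List.map_cons, ih]
      by_cases h : PySem.Chars.lowerChar c = o
      · simp [h, PySem.Chars.startswith_iff, List.cons_prefix_cons, PySem.Chars.lower]
      · simp only [PySem.Chars.startswith_iff, List.cons_prefix_cons]
        rw [if_neg (by simpa using h), if_neg (fun hc => h hc.1.symm)]

-- the five instances at Str level, with the opener length reduced to a numeral
theorem after_what_is (s : String) :
    bAfter s.toList "what is ".toList =
      if PySem.Str.startswith (PySem.Str.lower s) "what is "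
      then some (s.toList.drop 8) else none := by
  rw [bAfter_eq, show ("what is ".toList.length) = 8 from by decide]; simp

theorem after_what_are (s : String) :
    bAfter s.toList "what are ".toList =
      if PySem.Str.startswith (PySem.Str.lower s) "what are "
      then some (s.toList.drop 9) else none := by
  rw [bAfter_eq, show ("what are ".toList.length) = 9 from by decide]; simp

theorem after_how (s : String) :
    bAfter s.toList "how do i ".toList =
      if PySem.Str.startswith (PySem.Str.lower s) "how do i "
      then some (s.toList.drop 9) else none := by
  rw [bAfter_eq, show ("how do i ".toList.length) = 9 from by decide]; simp

theorem after_where (s : String) :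
    bAfter s.toList "where can i ".toList =
      if PySem.Str.startswith (PySem.Str.lower s) "where can i "
      then some (s.toList.drop 12) else none := by
  rw [bAfter_eq, show ("where can i ".toList.length) = 12 from by decide]; simp

theorem after_need (s : String) :
    bAfter s.toList "do i need ".toList =
      if PySem.Str.startswith (PySem.Str.lower s) "do i need "
      then some (s.toList.drop 10) else none := by
  rw [bAfter_eq, show ("do i need ".toList.length) = 10 from by decide]; simp

-- A's slice q[n:] is B's String.ofList (drop n)
theorem sliceOf (s : String) (n : Nat) :
    PySem.Str.slice s (some (n : Int)) none = String.ofList (s.toList.drop n) := by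
  have h : (PySem.Str.slice s (some (n : Int)) none).toList = s.toList.drop n := by
    simp [PySem.List.slice_from_natCast]
  conv_lhs => rw [← String.ofList_toList (s := PySem.Str.slice s (some (n : Int)) none)]
  rw [h]

theorem sliceOf8 (s : String) : PySem.Str.slice s (some 8) none = String.ofList (s.toList.drop 8) := by
  rw [show (8 : Int) = ((8 : Nat) : Int) from rfl]; exact sliceOf s 8
theorem sliceOf9 (s : String) : PySem.Str.slice s (some 9) none = String.ofList (s.toList.drop 9) := by
  rw [show (9 : Int) = ((9 : Nat) : Int) from rfl]; exact sliceOf s 9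
theorem sliceOf10 (s : String) : PySem.Str.slice s (some 10) none = String.ofList (s.toList.drop 10) := by
  rw [show (10 : Int) = ((10 : Nat) : Int) from rfl]; exact sliceOf s 10
theorem sliceOf12 (s : String) : PySem.Str.slice s (some 12) none = String.ofList (s.toList.drop 12) := by
  rw [show (12 : Int) = ((12 : Nat) : Int) from rfl]; exact sliceOf s 12

-- A's '?'-normalization (negated test) equals B's (positive test)
theorem pv_norm_eq (s : String) :
    (if !PySem.Str.endswith s "?" then s ++ "?" else s)
      = (if PySem.Str.endswith s "?" then s else s ++ "?") := by
  cases h : PySem.Str.endswith s "?" <;> simp [h]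

-- ===== VERDICT =====
theorem question_reformulation_spec : Claim_equal_question_reformulation := by
  intro question _
  unfold Spec_question_reformulation question_reformulation question_reformulation_alt
  dsimp only
  generalize PySem.Str.strip question = s
  cases hqm : PySem.Str.endswith s "?" <;>
    simp only [hqm, Bool.false_eq_true, if_false, if_true] <;>
    [skip; generalize PySem.Str.slice s none (some (-1)) = s] <;>
  · cases h1 : PySem.Str.startswith (PySem.Str.lower s) "what is " <;>
    cases h2 : PySem.Str.startswith (PySem.Str.lower s) "what are " <;>
    cases h3 : PySem.Str.startswith (PySem.Str.lower s) "how do i " <;>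
    cases h4 : PySem.Str.startswith (PySem.Str.lower s) "where can i " <;>
    cases h5 : PySem.Str.startswith (PySem.Str.lower s) "do i need " <;>
    simp only [bScan, bRules, bWhat, after_what_is, after_what_are, after_how, after_where,
      after_need, h1, h2, h3, h4, h5, Bool.false_eq_true, Bool.or_false, Bool.false_or,
      Bool.or_true, Bool.true_or, if_false, if_true, List.map_cons, List.map_nil,
      List.nil_append, List.isEmpty_nil, List.isEmpty_cons, pv_norm_eq,
      sliceOf8, sliceOf9, sliceOf10, sliceOf12,
      (by decide : bSuffix.getD "Can you tell me about " "" = ""),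
      (by decide : bSuffix.getD "Explain " "" = ""),
      (by decide : bSuffix.getD "Tell me about " "" = ""),
      (by decide : bSuffix.getD "I'd like to know about " "" = ""),
      (by decide : bSuffix.getD "What's the way to " "" = ""),
      (by decide : bSuffix.getD "How can I " "" = ""),
      (by decide : bSuffix.getD "What are the steps to " "" = ""),
      (by decide : bSuffix.getD "How do I find where to " "" = ""),
      (by decide : bSuffix.getD "What's the location to " "" = ""),
      (by decide : bSuffix.getD "Is it necessary to have " "" = ""),
      (by decide : bSuffix.getD "Must I have " "" = ""),
      (by decide : bSuffix.getD "Is " "" = " required"),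
      String.append_empty, String.append_assoc]
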